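-- pv_equiv track=rewrite | github.com/russellmatt66/CodeSamples | python/kaggle/learn-python/lesson-7/blackjack_greater_than.py | sort_aces
-- ===== SOURCE A (Python) =====
-- def sort_aces(hand):
--     computeHand = []
--     numAces = 0
--     for card in hand:
--         if (card == 'A'):
--             numAces += 1
--             continue
--         else:
--             computeHand.append(card)
--
--     for a in range(numAces):
--         computeHand.append('A')
--
--     return computeHand
-- ===== SOURCE B (Python) =====
-- def sort_aces(hand):
--     # Stable sort: non-aces (key False) keep their order and come first, aces collect at the end.
--     return sorted(hand, key=lambda c: c == 'A')
-- ===== Notes on version B (the rewrite author's own statement) =====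
-- stated objective: idiomatic
-- what changed: Replaces the two-pass count-and-append partition with a single stable sort keyed on the boolean ace predicate (False < True sends aces to the end, stability keeps non-ace order).
import Mathlib
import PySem

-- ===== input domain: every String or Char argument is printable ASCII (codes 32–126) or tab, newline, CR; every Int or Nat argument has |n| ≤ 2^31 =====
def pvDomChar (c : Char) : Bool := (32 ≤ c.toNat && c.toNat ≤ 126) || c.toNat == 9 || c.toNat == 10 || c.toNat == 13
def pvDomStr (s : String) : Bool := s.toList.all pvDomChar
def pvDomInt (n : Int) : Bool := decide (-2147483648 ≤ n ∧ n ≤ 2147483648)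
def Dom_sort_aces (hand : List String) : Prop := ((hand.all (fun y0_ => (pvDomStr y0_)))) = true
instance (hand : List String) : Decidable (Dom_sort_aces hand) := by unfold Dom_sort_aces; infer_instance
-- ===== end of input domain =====

-- B replaces A's two-pass count-and-append partition with a single stable sort keyed on the
-- boolean ace predicate (idiomatic; same return value, neither mutates its argument).

-- ===== PORT A =====
def sort_aces (hand : List String) : List String :=
  let s := hand.foldl (fun (st : List String × Int) card =>
      if card == "A" then (st.1, st.2 + 1) else (st.1 ++ [card], st.2)) ([], 0)
  (PySem.List.pyRange 0 s.2 1).foldl (fun acc _ => acc ++ ["A"]) s.1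

-- ===== PORT B =====
def sort_aces_alt (hand : List String) : List String :=
  PySem.List.sorted hand (fun c => c == "A") false

-- ===== PRECONDITION & SPEC =====
def Spec_sort_aces (hand : List String) (out : List String) : Prop := out = sort_aces_alt hand
instance (hand : List String) (out : List String) : Decidable (Spec_sort_aces hand out) := by unfold Spec_sort_aces; infer_instance

-- ===== CLAIM (what is proved, stated in full; the proofs are below) =====
def Claim_equal_sort_aces : Prop := ∀ (hand : List String), Dom_sort_aces hand → Spec_sort_aces hand (sort_aces hand)

-- ===== LEMMAS AND PROOFS =====

-- A's first loop: the accumulator collects the non-aces in order, the counter counts the aces.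
lemma loopA (l : List String) : ∀ (L : List String) (k : Int),
    l.foldl (fun (st : List String × Int) card =>
      if card == "A" then (st.1, st.2 + 1) else (st.1 ++ [card], st.2)) (L, k)
    = (L ++ l.filter (fun c => !(c == "A")), k + (l.count "A" : Int)) := by
  induction l with
  | nil => intro L k; simp
  | cons x t ih =>
    intro L k
    by_cases hx : x = "A"
    · subst hx
      simp only [List.foldl_cons, if_pos (by rfl : ("A" == "A") = true)]
      rw [ih]
      simp
      ring
    · have hx' : (x == "A") = false := by simp [hx]
      simp only [List.foldl_cons, hx', Bool.false_eq_true,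
        if_neg (fun h => hx (by simpa using h))]
      rw [ih]
      simp [hx', hx]

-- A's second loop: appending "A" once per range element is appending a replicate.
lemma tailA (L : List String) (k : Nat) :
    (PySem.List.pyRange 0 (k : Int) 1).foldl (fun acc _ => acc ++ ["A"]) L
    = L ++ List.replicate k "A" := by
  rw [PySem.List.foldl_append_singleton_eq_map]
  congr 1
  have hlen : (PySem.List.pyRange 0 (k : Int) 1).length = k := by
    simp [PySem.List.pyRange_zero_natCast]
  calc List.map (fun _ => "A") (PySem.List.pyRange 0 (k : Int) 1)
      = List.replicate (PySem.List.pyRange 0 (k : Int) 1).length "A" := by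
        induction (PySem.List.pyRange 0 (k : Int) 1) with
        | nil => rfl
        | cons a t ih => simp [List.replicate_succ, ih]
    _ = List.replicate k "A" := by rw [hlen]

-- Inserting a non-ace into "non-aces ++ aces" lands right before the block of aces.
lemma ins_nonace (x : String) (hx : (x == "A") = false) (L : List String)
    (hL : ∀ y ∈ L, (y == "A") = false) (k : Nat) :
    PySem.List.insertBy (fun a b => decide ((a == "A") < (b == "A"))) x (L ++ List.replicate k "A")
    = (L ++ [x]) ++ List.replicate k "A" := by
  induction L with
  | nil =>
    cases k with
    | zero => rfl
    | succ n => simp [List.replicate_succ, PySem.List.insertBy, hx]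
  | cons y t ih =>
    have hy : (y == "A") = false := hL y (by simp)
    simp only [List.cons_append]
    simp [PySem.List.insertBy, hx, hy, ih (fun z hz => hL z (by simp [hz]))]

-- Inserting an ace into "non-aces ++ aces" lands at the very end.
lemma ins_ace (L : List String) (k : Nat) :
    PySem.List.insertBy (fun a b => decide ((a == "A") < (b == "A"))) "A" (L ++ List.replicate k "A")
    = L ++ List.replicate (k + 1) "A" := by
  rw [PySem.List.insertBy_of_forall_not_before]
  · rw [List.append_assoc, ← List.replicate_succ']
  · intro y _; simp

-- B's insertion-sort fold keeps the invariant "processed non-aces in order ++ processed aces".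
lemma loopB (l : List String) : ∀ (L : List String) (k : Nat),
    (∀ y ∈ L, (y == "A") = false) →
    l.foldl (fun acc x => PySem.List.insertBy (fun a b => decide ((a == "A") < (b == "A"))) x acc)
      (L ++ List.replicate k "A")
    = (L ++ l.filter (fun c => !(c == "A"))) ++ List.replicate (k + l.count "A") "A" := by
  induction l with
  | nil => intro L k _; simp
  | cons x t ih =>
    intro L k hL
    by_cases hx : x = "A"
    · subst hx
      simp only [List.foldl_cons]
      rw [ins_ace L k, ih L (k + 1) hL]
      have h : k + 1 + List.count "A" t = k + List.count "A" ("A" :: t) := by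
        rw [List.count_cons_self]; omega
      rw [h]
      simp [List.filter_cons]
    · have hx' : (x == "A") = false := by simp [hx]
      simp only [List.foldl_cons]
      rw [ins_nonace x hx' L hL k,
          ih (L ++ [x]) k (by intro y hy; rcases List.mem_append.mp hy with h | h;
                              exact hL y h; simp at h; simp [h, hx])]
      simp [hx', hx]

lemma main_eq (hand : List String) : sort_aces hand = sort_aces_alt hand := by
  unfold sort_aces sort_aces_alt
  rw [PySem.List.sorted_eq_foldl_insertBy]
  have hA := loopA hand [] 0
  have hB := loopB hand [] 0 (by simp)
  simp only [List.nil_append, Nat.zero_add, List.replicate_zero] at hA hB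
  simp only [hA]
  have : ((0 : Int) + (hand.count "A" : Int)) = ((hand.count "A" : Nat) : Int) := by omega
  rw [this, tailA]
  exact hB.symm

-- ===== VERDICT (by name: the statement is the Claim_ definition above) =====
theorem sort_aces_spec : Claim_equal_sort_aces := by
  intro hand _
  unfold Spec_sort_aces
  exact main_eq hand
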